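-- pv_equiv track=rewrite | github.com/5uperb0y/rosalind | code/rear/rear.py | rev_dist
-- ===== SOURCE A (Python) =====
-- def swap(l):
--     """
--     Generate all possible sequences of a tuple by reversing segments.
--
--     Args:
--         l (tuple): Input tuple, e.g., (1, 2).
--
--     Returns:
--         set: Set of tuples with reversed segments, e.g., {(1, 2), (2, 1)}.
--     """
--     return {
--         l[:i] + l[i:j][::-1] + l[j:]
--         for j in range(len(l) + 1)
--         for i in range(j)
--     }
--
-- def get_next_steps(curr, visited):
--     """Generates next steps by swapping elements in `curr`, excluding those in `visited`.
--
--     Args: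
--         curr (set): Current states.
--         visited (set): States to exclude.
--
--     Returns:
--         set: Next possible states.
--     """
--     next_steps = set()
--     for e in curr:
--         next_steps.update(swap(e).difference(visited))
--     return next_steps
--
-- def rev_dist(s1, s2):
--     """Calculate the minimum number of reversals required to transform tuple s1 to tuple s2
--     using bidirectional broad-first search.
--
--     Args:
--         s1 (tuple): Starting tuple.
--         s2 (tuple): Target tuple.
--
--     Returns:
--         int: Minimum number of reversals required, or -1 if transformation is not possible.
--     """
--     f_curr, f_visited, b_curr, b_visited = {s1}, {s1}, {s2}, {s2}
--     dist = 0
--     while f_curr and b_curr: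
--         if f_curr.intersection(b_curr):
--             return dist
--         else:
--             dist = dist + 1
--             f_curr = get_next_steps(f_curr, f_visited)
--             f_visited.update(f_curr)
--         if b_curr.intersection(f_curr):
--             return dist
--         else:
--             dist = dist + 1
--             b_curr = get_next_steps(b_curr, b_visited)
--             b_visited.update(b_curr)
--     return -1
-- ===== SOURCE B (Python) =====
-- def rev_dist(s1, s2):
--     """Minimum number of segment reversals turning tuple s1 into tuple s2 (-1 if impossible).
--     Plain single-source breadth-first search with one frontier and one visited set."""
--     if sorted(s1) != sorted(s2):
--         return -1
--     frontier = {s1}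
--     visited = {s1}
--     dist = 0
--     while frontier:
--         if s2 in frontier:
--             return dist
--         nxt = set()
--         for st in frontier:
--             for i in range(len(st)):
--                 for j in range(i + 1, len(st) + 1):
--                     nb = st[:i] + st[i:j][::-1] + st[j:]
--                     if nb not in visited:
--                         nxt.add(nb)
--         visited |= nxt
--         frontier = nxt
--         dist += 1
--     return -1
-- ===== Notes on version B (the rewrite author's own statement) =====
-- stated objective: simpler
-- what changed: Replaces the bidirectional (meet-in-the-middle) BFS with its alternating forward/backward frontiers, two visited sets and sphere-intersection tests by an upfront multiset check (sorted(s1) != sorted(s2) -> -1, since reversals only permute) followed by a plain single-source level BFS from s1 with one frontier, one visited set and a membership test for s2.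
import Mathlib
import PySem

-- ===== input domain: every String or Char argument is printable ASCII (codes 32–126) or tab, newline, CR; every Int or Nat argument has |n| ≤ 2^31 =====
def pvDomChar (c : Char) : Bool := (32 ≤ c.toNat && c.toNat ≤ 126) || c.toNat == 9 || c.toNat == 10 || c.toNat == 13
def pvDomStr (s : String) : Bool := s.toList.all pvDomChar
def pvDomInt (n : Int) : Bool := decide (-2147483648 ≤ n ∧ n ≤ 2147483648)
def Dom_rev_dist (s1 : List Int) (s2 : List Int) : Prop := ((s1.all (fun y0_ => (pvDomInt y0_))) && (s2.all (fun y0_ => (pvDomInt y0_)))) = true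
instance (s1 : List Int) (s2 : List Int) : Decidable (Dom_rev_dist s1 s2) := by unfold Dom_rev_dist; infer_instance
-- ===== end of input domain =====

-- B replaces A's bidirectional (meet-in-the-middle) BFS by a plain single-source level
-- BFS from s1 (one frontier, one visited set, membership test for s2); same return value.
-- Both loops are ported with a fuel argument that provably never runs out
-- (number of iterations is bounded by the number of permutations of s1).

-- l[:i] + l[i:j][::-1] + l[j:]  — the segment-reversal expression both Pythons share
-- ([::-1] on the slice is List.reverse, cf. PySem.List.slice?_none_none_neg_one).
def segRev (l : List Int) (i j : Int) : List Int :=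
  PySem.List.slice l none (some i) ++ (PySem.List.slice l (some i) (some j)).reverse
    ++ PySem.List.slice l (some j) none

-- ===== PORT A =====
-- swap(l): set comprehension over j in range(len(l)+1), i in range(j)
def pySwap (l : List Int) : PySem.Set (List Int) :=
  PySem.Set.ofList ((PySem.List.pyRange 0 ((l.length : Int) + 1) 1).flatMap (fun j =>
    (PySem.List.pyRange 0 j 1).map (fun i => segRev l i j)))

-- get_next_steps(curr, visited): for e in curr: next_steps.update(swap(e).difference(visited))
def pyGetNextSteps (curr visited : PySem.Set (List Int)) : PySem.Set (List Int) :=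
  curr.foldl (fun ns e => PySem.Set.update ns (PySem.Set.diff (pySwap e) visited)) PySem.Set.empty

-- the while loop of rev_dist; the repeated 'pyGetNextSteps fc fv' is Python's local f_curr
-- (and likewise for the backward side); fuel only makes the recursion structural.
def revLoopA : Nat → PySem.Set (List Int) → PySem.Set (List Int) → PySem.Set (List Int) →
    PySem.Set (List Int) → Int → Int
  | 0, _, _, _, _, _ => -1
  | fuel + 1, fc, fv, bc, bv, dist =>
    if fc ≠ [] ∧ bc ≠ [] then
      if PySem.Set.inter fc bc ≠ [] then dist
      else
        if PySem.Set.inter bc (pyGetNextSteps fc fv) ≠ [] then dist + 1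
        else
          revLoopA fuel (pyGetNextSteps fc fv) (PySem.Set.update fv (pyGetNextSteps fc fv))
            (pyGetNextSteps bc bv) (PySem.Set.update bv (pyGetNextSteps bc bv)) (dist + 2)
    else -1

def rev_dist (s1 : List Int) (s2 : List Int) : Int :=
  revLoopA (Nat.factorial s1.length + 3)
    (PySem.Set.ofList [s1]) (PySem.Set.ofList [s1])
    (PySem.Set.ofList [s2]) (PySem.Set.ofList [s2]) 0

-- ===== PORT B =====
-- the nested for-loops building nxt: for st in frontier: for i in range(len(st)):
--   for j in range(i+1, len(st)+1): nb = st[:i]+st[i:j][::-1]+st[j:]; if nb not in visited: nxt.add(nb)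
def altStep (frontier visited : PySem.Set (List Int)) : PySem.Set (List Int) :=
  frontier.foldl (fun nxt st =>
    (PySem.List.pyRange 0 (st.length : Int) 1).foldl (fun nxt i =>
      (PySem.List.pyRange (i + 1) ((st.length : Int) + 1) 1).foldl (fun nxt j =>
        if segRev st i j ∈ visited then nxt else PySem.Set.add nxt (segRev st i j)) nxt) nxt)
    PySem.Set.empty

-- the while loop of B; the repeated 'altStep frontier visited' is Python's local nxt.
def revLoopB (s2 : List Int) : Nat → PySem.Set (List Int) → PySem.Set (List Int) → Int → Int
  | 0, _, _, _ => -1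
  | fuel + 1, frontier, visited, dist =>
    if frontier ≠ [] then
      if s2 ∈ frontier then dist
      else
        revLoopB s2 fuel (altStep frontier visited)
          (PySem.Set.update visited (altStep frontier visited)) (dist + 1)
    else -1

-- if sorted(s1) != sorted(s2): return -1  (no rearrangement can work)
def rev_dist_alt (s1 : List Int) (s2 : List Int) : Int :=
  if PySem.List.sorted s1 (fun x => x) false ≠ PySem.List.sorted s2 (fun x => x) false then -1
  else revLoopB s2 (Nat.factorial s1.length + 3) (PySem.Set.ofList [s1]) (PySem.Set.ofList [s1]) 0

-- ===== PRECONDITION & SPEC =====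
def Spec_rev_dist (s1 : List Int) (s2 : List Int) (out : Int) : Prop := out = rev_dist_alt s1 s2
instance (s1 : List Int) (s2 : List Int) (out : Int) : Decidable (Spec_rev_dist s1 s2 out) := by unfold Spec_rev_dist; infer_instance

-- ===== CLAIM (what is proved, stated in full; the proofs are below) =====
def Claim_equal_rev_dist : Prop := ∀ (s1 : List Int) (s2 : List Int), Dom_rev_dist s1 s2 → Spec_rev_dist s1 s2 (rev_dist s1 s2)

-- ===== LEMMAS AND PROOFS =====

-- the reversal-graph edge relation: x is l with one segment l[i:j] (0 ≤ i < j ≤ len) reversed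
def RAdj (l x : List Int) : Prop :=
  ∃ i j : Nat, i < j ∧ j ≤ l.length ∧
    x = l.take i ++ ((l.drop i).take (j - i)).reverse ++ l.drop j

-- ball of radius k around s in the reversal graph
def RBall (s : List Int) : Nat → List Int → Prop
  | 0, y => y = s
  | k + 1, y => RBall s k y ∨ ∃ x, RBall s k x ∧ RAdj x y

-- sphere: exactly at distance k
def RSph (s : List Int) (k : Nat) (y : List Int) : Prop :=
  RBall s k y ∧ ∀ j < k, ¬ RBall s j y

lemma segRev_natCast (l : List Int) (i j : Nat) :
    segRev l (i : Int) (j : Int) =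
      l.take i ++ ((l.drop i).take (j - i)).reverse ++ l.drop j := by
  simp [segRev, PySem.List.slice_to_natCast, PySem.List.slice_natCast,
    PySem.List.slice_from_natCast]

lemma exists_segRev_iff_radj (l y : List Int) :
    (∃ i j : Int, 0 ≤ i ∧ i < j ∧ j < (l.length : Int) + 1 ∧ y = segRev l i j) ↔ RAdj l y := by
  constructor
  · rintro ⟨i, j, hi, hij, hj, rfl⟩
    refine ⟨i.toNat, j.toNat, by omega, by omega, ?_⟩
    rw [← segRev_natCast, Int.toNat_of_nonneg hi, Int.toNat_of_nonneg (by omega)]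
  · rintro ⟨i, j, hij, hjl, rfl⟩
    exact ⟨(i : Int), (j : Int), by omega, by omega, by omega, (segRev_natCast l i j).symm⟩

lemma mem_pySwap (l y : List Int) : y ∈ pySwap l ↔ RAdj l y := by
  rw [← exists_segRev_iff_radj]
  simp only [pySwap, PySem.Set.mem_ofList, List.mem_flatMap, List.mem_map,
    PySem.List.mem_pyRange_one]
  constructor
  · rintro ⟨j, ⟨hj0, hj⟩, i, ⟨hi0, hij⟩, rfl⟩
    exact ⟨i, j, hi0, hij, hj, rfl⟩
  · rintro ⟨i, j, hi0, hij, hj, rfl⟩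
    exact ⟨j, ⟨by omega, hj⟩, i, ⟨hi0, hij⟩, rfl⟩

-- membership through a set-building foldl, given a membership description of its body
lemma mem_foldl_pred {α β : Type} (f : List α → β → List α) (Q : β → α → Prop)
    (H : ∀ s b y, y ∈ f s b ↔ y ∈ s ∨ Q b y) (l : List β) (s₀ : List α) (y : α) :
    y ∈ l.foldl f s₀ ↔ y ∈ s₀ ∨ ∃ b ∈ l, Q b y := by
  induction l generalizing s₀ with
  | nil => simp
  | cons b l ih => rw [List.foldl_cons, ih, H]; simp; tauto

lemma mem_pyGetNextSteps (curr visited : PySem.Set (List Int)) (y : List Int) :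
    y ∈ pyGetNextSteps curr visited ↔ ∃ e ∈ curr, RAdj e y ∧ y ∉ visited := by
  unfold pyGetNextSteps
  rw [mem_foldl_pred _ (fun e y => RAdj e y ∧ y ∉ visited)]
  · simp [PySem.Set.empty]
  · intro s b z
    rw [PySem.Set.mem_update]
    simp [PySem.Set.mem_diff, mem_pySwap]

lemma nb_iff (st y : List Int) (visited : PySem.Set (List Int)) :
    (∃ i ∈ PySem.List.pyRange 0 (st.length : Int) 1,
      ∃ j ∈ PySem.List.pyRange (i + 1) ((st.length : Int) + 1) 1,
        y = segRev st i j ∧ segRev st i j ∉ visited) ↔ RAdj st y ∧ y ∉ visited := by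
  constructor
  · rintro ⟨i, hi, j, hj, rfl, hnv⟩
    rw [PySem.List.mem_pyRange_one] at hi hj
    exact ⟨(exists_segRev_iff_radj st _).mp ⟨i, j, hi.1, by omega, by omega, rfl⟩, hnv⟩
  · rintro ⟨hadj, hnv⟩
    obtain ⟨i, j, hi, hij, hj, hy⟩ := (exists_segRev_iff_radj st y).mpr hadj
    refine ⟨i, ?_, j, ?_, hy, hy ▸ hnv⟩
    · rw [PySem.List.mem_pyRange_one]; omega
    · rw [PySem.List.mem_pyRange_one]; omega

lemma mem_altStep (frontier visited : PySem.Set (List Int)) (y : List Int) :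
    y ∈ altStep frontier visited ↔ ∃ e ∈ frontier, RAdj e y ∧ y ∉ visited := by
  unfold altStep
  rw [mem_foldl_pred _ (fun st y => RAdj st y ∧ y ∉ visited)]
  · simp [PySem.Set.empty]
  · intro s st z
    rw [← nb_iff st z visited]
    rw [mem_foldl_pred _
      (fun i z => ∃ j ∈ PySem.List.pyRange (i + 1) ((st.length : Int) + 1) 1,
        z = segRev st i j ∧ segRev st i j ∉ visited)]
    intro s' i z
    rw [mem_foldl_pred _ (fun j z => z = segRev st i j ∧ segRev st i j ∉ visited)]
    intro s'' j z
    by_cases hv : segRev st i j ∈ visited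
    · rw [if_pos hv]
      constructor
      · exact Or.inl
      · rintro (h | ⟨rfl, hc⟩)
        · exact h
        · exact absurd hv hc
    · rw [if_neg hv, PySem.Set.mem_add]; tauto

-- ---- basic facts about RAdj / RBall / RSph ----

lemma take_drop_assemble (l : List Int) (i j : Nat) (hij : i < j) :
    l.take i ++ (l.drop i).take (j - i) ++ l.drop j = l := by
  have hd : (l.drop i).drop (j - i) = l.drop j := by
    rw [List.drop_drop]
    congr 1
    omega
  rw [List.append_assoc, ← hd, List.take_append_drop, List.take_append_drop]

lemma radj_perm {l x : List Int} (h : RAdj l x) : x.Perm l := by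
  obtain ⟨i, j, hij, _, rfl⟩ := h
  calc (l.take i ++ ((l.drop i).take (j - i)).reverse ++ l.drop j).Perm
        (l.take i ++ (l.drop i).take (j - i) ++ l.drop j) :=
        ((List.reverse_perm _).append_left _).append_right _
    _ = l := take_drop_assemble l i j hij

lemma radj_symm {l x : List Int} (h : RAdj l x) : RAdj x l := by
  obtain ⟨i, j, hij, hj, rfl⟩ := h
  have hi : i ≤ l.length := by omega
  have hta : (l.take i).length = i := by simp; omega
  have htb : (((l.drop i).take (j - i)).reverse).length = j - i := by
    simp; omega
  refine ⟨i, j, hij, ?_, ?_⟩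
  · simp; omega
  · have h1 : (l.take i ++ ((l.drop i).take (j - i)).reverse ++ l.drop j).take i = l.take i := by
      rw [List.append_assoc, List.take_left' hta]
    have h2 : (l.take i ++ ((l.drop i).take (j - i)).reverse ++ l.drop j).drop i
        = ((l.drop i).take (j - i)).reverse ++ l.drop j := by
      rw [List.append_assoc, List.drop_left' hta]
    have h3 : (l.take i ++ ((l.drop i).take (j - i)).reverse ++ l.drop j).drop j
        = l.drop j := by
      have hj' : i + (j - i) = j := by omega
      have e : ((l.take i ++ ((l.drop i).take (j - i)).reverse ++ l.drop j).drop i).drop (j - i)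
          = (l.take i ++ ((l.drop i).take (j - i)).reverse ++ l.drop j).drop j := by
        rw [List.drop_drop, hj']
      rw [← e, h2, List.drop_left' htb]
    rw [h1, h2, List.take_left' htb, List.reverse_reverse, h3]
    exact (take_drop_assemble l i j hij).symm

lemma rball_mono {s : List Int} : ∀ {j k : Nat}, j ≤ k → ∀ {y}, RBall s j y → RBall s k y := by
  intro j k hjk
  induction k with
  | zero => intro y h; have : j = 0 := by omega
            subst this; exact h
  | succ k ih =>
    intro y h
    by_cases hj : j = k + 1
    · subst hj; exact h
    · exact Or.inl (ih (by omega) h)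

lemma rball_perm {s : List Int} : ∀ {k y}, RBall s k y → y.Perm s := by
  intro k
  induction k with
  | zero => intro y h; cases h; exact List.Perm.refl s
  | succ k ih =>
    rintro y (h | ⟨x, hx, hadj⟩)
    · exact ih h
    · exact (radj_perm hadj).trans (ih hx)

lemma rball_prepend {y x : List Int} (hadj : RAdj y x) :
    ∀ {k z}, RBall x k z → RBall y (k + 1) z := by
  intro k
  induction k with
  | zero => intro z hz; cases hz; exact Or.inr ⟨y, rfl, hadj⟩
  | succ k ih =>
    rintro z (h | ⟨w, hw, hwz⟩)
    · exact Or.inl (ih h)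
    · exact Or.inr ⟨w, ih hw, hwz⟩

lemma rball_symm {s : List Int} : ∀ {k y}, RBall s k y → RBall y k s := by
  intro k
  induction k with
  | zero => intro y h; cases h; rfl
  | succ k ih =>
    rintro y (h | ⟨x, hx, hadj⟩)
    · exact Or.inl (ih h)
    · exact rball_prepend (radj_symm hadj) (ih hx)

lemma rball_trans {s x : List Int} {a : Nat} (hs : RBall s a x) :
    ∀ {b y}, RBall x b y → RBall s (a + b) y := by
  intro b
  induction b with
  | zero => intro y h; cases h; exact hs
  | succ b ih =>
    rintro y (h | ⟨w, hw, hwy⟩)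
    · exact rball_mono (by omega) (ih h)
    · exact Or.inr ⟨w, ih hw, hwy⟩

lemma rball_split {s : List Int} {a : Nat} :
    ∀ {b y}, RBall s (a + b) y → ∃ x, RBall s a x ∧ RBall x b y := by
  intro b
  induction b with
  | zero => intro y h; exact ⟨y, h, rfl⟩
  | succ b ih =>
    rintro y (h | ⟨w, hw, hwy⟩)
    · obtain ⟨x, hx, hxy⟩ := ih h
      exact ⟨x, hx, rball_mono (by omega) hxy⟩
    · obtain ⟨x, hx, hxw⟩ := ih hw
      exact ⟨x, hx, Or.inr ⟨w, hxw, hwy⟩⟩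

lemma rball_stab {s : List Int} {k : Nat}
    (h : ∀ y, RBall s (k + 1) y → RBall s k y) :
    ∀ m y, RBall s m y → RBall s k y := by
  intro m
  induction m with
  | zero => intro y hy; cases hy; exact rball_mono (by omega) (show RBall s 0 s from rfl)
  | succ m ih =>
    rintro y (hy | ⟨x, hx, hxy⟩)
    · exact ih y hy
    · exact h y (Or.inr ⟨x, ih x hx, hxy⟩)

lemma rsph_zero (s y : List Int) : RSph s 0 y ↔ y = s := by
  constructor
  · rintro ⟨h, _⟩; exact h
  · rintro rfl; exact ⟨rfl, by omega⟩

lemma rball_succ_iff_sph (s : List Int) (k : Nat) (y : List Int) :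
    RBall s (k + 1) y ↔ RBall s k y ∨ RSph s (k + 1) y := by
  constructor
  · intro h
    by_cases hb : RBall s k y
    · exact Or.inl hb
    · refine Or.inr ⟨h, ?_⟩
      intro j hj hb'
      exact hb (rball_mono (by omega) hb')
  · rintro (h | ⟨h, _⟩)
    · exact Or.inl h
    · exact h

lemma rsph_succ (s : List Int) (k : Nat) (y : List Int) :
    RSph s (k + 1) y ↔ (∃ e, RSph s k e ∧ RAdj e y) ∧ ¬ RBall s k y := by
  constructor
  · rintro ⟨hb, hmin⟩
    have hnk : ¬ RBall s k y := hmin k (by omega)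
    rcases hb with h | ⟨x, hx, hadj⟩
    · exact absurd h hnk
    · refine ⟨⟨x, ⟨hx, ?_⟩, hadj⟩, hnk⟩
      intro j hj hbj
      exact hmin (j + 1) (by omega) (Or.inr ⟨x, hbj, hadj⟩)
  · rintro ⟨⟨e, ⟨hbe, _⟩, hadj⟩, hnk⟩
    refine ⟨Or.inr ⟨e, hbe, hadj⟩, ?_⟩
    intro j hj hbj
    exact hnk (rball_mono (by omega) hbj)

lemma rsph_nonempty {s t : List Int} {d : Nat} (hd : RBall s d t)
    (hmin : ∀ j < d, ¬ RBall s j t) : ∀ k ≤ d, ∃ y, RSph s k y := by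
  intro k hk
  by_contra hne
  push_neg at hne
  rcases Nat.eq_zero_or_pos k with rfl | hkpos
  · exact hne s ⟨rfl, by omega⟩
  · obtain ⟨k', rfl⟩ : ∃ k', k = k' + 1 := ⟨k - 1, by omega⟩
    have hsub : ∀ y, RBall s (k' + 1) y → RBall s k' y := by
      intro y hy
      rcases (rball_succ_iff_sph s k' y).mp hy with h | h
      · exact h
      · exact absurd h (hne y)
    have := rball_stab hsub d t hd
    exact hmin k' (by omega) this

-- a point in both spheres yields a path s1 → s2
lemma sph_meet {s1 s2 y : List Int} {a b : Nat}
    (h1 : RBall s1 a y) (h2 : RBall s2 b y) : RBall s1 (a + b) s2 :=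
  rball_trans h1 (rball_symm h2)

-- midpoint of a shortest path: both spheres intersect when a + b = d (d minimal)
lemma sph_midpoint {s1 s2 : List Int} {d a b : Nat} (hab : a + b = d)
    (hd : RBall s1 d s2) (hmin : ∀ j < d, ¬ RBall s1 j s2) :
    ∃ x, RSph s1 a x ∧ RSph s2 b x := by
  subst hab
  obtain ⟨x, hx1, hx2⟩ := rball_split hd
  refine ⟨x, ⟨hx1, ?_⟩, ⟨rball_symm hx2, ?_⟩⟩
  · intro j hj hbj
    exact hmin (j + b) (by omega) (rball_trans hbj hx2)
  · intro j hj hbj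
    exact hmin (a + j) (by omega) (rball_trans hx1 (rball_symm hbj))

-- ---- cardinality / fuel bookkeeping ----

lemma visited_le_factorial (s : List Int) (fv : List (List Int)) (hnd : fv.Nodup)
    (h : ∀ y ∈ fv, y.Perm s) : fv.length ≤ Nat.factorial s.length := by
  calc fv.length = fv.toFinset.card := (List.toFinset_card_of_nodup hnd).symm
    _ ≤ s.permutations.toFinset.card := by
        apply Finset.card_le_card
        intro y hy
        rw [List.mem_toFinset] at *
        exact List.mem_permutations.mpr (h y hy)
    _ ≤ s.permutations.length := List.toFinset_card_le _
    _ = Nat.factorial s.length := List.length_permutations s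

lemma length_lt_update (s nx : List (List Int)) (y : List Int) (hy : y ∈ nx) (hys : y ∉ s) :
    s.length < (PySem.Set.update s nx).length := by
  rw [PySem.Set.update_eq_append_filter, List.length_append]
  have hne : (PySem.Set.ofList nx).filter (fun z => !(PySem.Set.contains s z)) ≠ [] := by
    apply List.ne_nil_of_mem (a := y)
    rw [List.mem_filter]
    refine ⟨by rw [PySem.Set.mem_ofList]; exact hy,
      by simp [PySem.Set.contains_eq_listContains, hys]⟩
  have := List.length_pos_of_ne_nil hne
  omega

lemma ne_nil_of_exists {s : List (List Int)} (h : ∃ y, y ∈ s) : s ≠ [] := by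
  obtain ⟨y, hy⟩ := h
  exact List.ne_nil_of_mem hy

lemma inter_ne_nil {s t : List (List Int)} {y : List Int} (hs : y ∈ s) (ht : y ∈ t) :
    PySem.Set.inter s t ≠ [] :=
  List.ne_nil_of_mem ((PySem.Set.mem_inter s t y).mpr ⟨hs, ht⟩)

lemma inter_eq_nil_intro {s t : List (List Int)} (h : ∀ y, ¬ (y ∈ s ∧ y ∈ t)) :
    ¬ PySem.Set.inter s t ≠ [] := by
  rw [not_ne_iff, List.eq_nil_iff_forall_not_mem]
  intro y hy
  exact h y ((PySem.Set.mem_inter s t y).mp hy)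

-- ---- the frontier/visited step preserves the sphere/ball invariants ----

lemma step_frontier {s : List Int} {k : Nat} {fc fv nx : PySem.Set (List Int)}
    (hmem : ∀ y, y ∈ nx ↔ ∃ e ∈ fc, RAdj e y ∧ y ∉ fv)
    (hfc : ∀ y, y ∈ fc ↔ RSph s k y) (hfv : ∀ y, y ∈ fv ↔ RBall s k y) :
    ∀ y, y ∈ nx ↔ RSph s (k + 1) y := by
  intro y
  rw [hmem, rsph_succ]
  constructor
  · rintro ⟨e, he, hadj, hnv⟩
    exact ⟨⟨e, (hfc e).mp he, hadj⟩, fun hb => hnv ((hfv y).mpr hb)⟩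
  · rintro ⟨⟨e, hse, hadj⟩, hnb⟩
    exact ⟨e, (hfc e).mpr hse, hadj, fun hv => hnb ((hfv y).mp hv)⟩

lemma step_visited {s : List Int} {k : Nat} {fv nx : PySem.Set (List Int)}
    (hnx : ∀ y, y ∈ nx ↔ RSph s (k + 1) y) (hfv : ∀ y, y ∈ fv ↔ RBall s k y) :
    ∀ y, y ∈ PySem.Set.update fv nx ↔ RBall s (k + 1) y := by
  intro y
  rw [PySem.Set.mem_update, hfv, hnx, rball_succ_iff_sph]

-- ---- loop correctness, reachable case ----

lemma revLoopA_reach (s1 s2 : List Int) (d : Nat)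
    (hd : RBall s1 d s2) (hmin : ∀ j < d, ¬ RBall s1 j s2) :
    ∀ fuel k (fc fv bc bv : PySem.Set (List Int)),
      (∀ y, y ∈ fc ↔ RSph s1 k y) → (∀ y, y ∈ fv ↔ RBall s1 k y) →
      (∀ y, y ∈ bc ↔ RSph s2 k y) → (∀ y, y ∈ bv ↔ RBall s2 k y) →
      fv.Nodup → 2 * k ≤ d → Nat.factorial s1.length + 2 ≤ fuel + fv.length →
      revLoopA fuel fc fv bc bv ((2 * k : Nat) : Int) = (d : Int) := by
  have hd' : RBall s2 d s1 := rball_symm hd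
  have hmin' : ∀ j < d, ¬ RBall s2 j s1 := fun j hj hb => hmin j hj (rball_symm hb)
  intro fuel
  induction fuel with
  | zero =>
    intro k fc fv bc bv hfc hfv hbc hbv hnd hk hfuel
    exfalso
    have := visited_le_factorial s1 fv hnd (fun y hy => rball_perm ((hfv y).mp hy))
    omega
  | succ fuel ih =>
    intro k fc fv bc bv hfc hfv hbc hbv hnd hk hfuel
    have hkd : k ≤ d := by omega
    obtain ⟨yf, hyf⟩ := rsph_nonempty hd hmin k hkd
    obtain ⟨yb, hyb⟩ := rsph_nonempty hd' hmin' k hkd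
    simp only [revLoopA]
    rw [if_pos ⟨ne_nil_of_exists ⟨yf, (hfc yf).mpr hyf⟩, ne_nil_of_exists ⟨yb, (hbc yb).mpr hyb⟩⟩]
    by_cases hdk : 2 * k = d
    · obtain ⟨x, hx1, hx2⟩ := sph_midpoint (show k + k = d by omega) hd hmin
      rw [if_pos (inter_ne_nil ((hfc x).mpr hx1) ((hbc x).mpr hx2))]
      omega
    · have h2k : 2 * k < d := by omega
      rw [if_neg (inter_eq_nil_intro (fun y ⟨h1, h2⟩ =>
        hmin (k + k) (by omega) (sph_meet ((hfc y).mp h1).1 ((hbc y).mp h2).1)))]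
      have hfc' := step_frontier (mem_pyGetNextSteps fc fv) hfc hfv
      have hfv' := step_visited hfc' hfv
      by_cases hdk1 : 2 * k + 1 = d
      · obtain ⟨x, hx1, hx2⟩ := sph_midpoint (show (k + 1) + k = d by omega) hd hmin
        rw [if_pos (inter_ne_nil ((hbc x).mpr hx2) ((hfc' x).mpr hx1))]
        omega
      · have h2k1 : 2 * k + 1 < d := by omega
        rw [if_neg (inter_eq_nil_intro (fun y ⟨h1, h2⟩ =>
          hmin ((k + 1) + k) (by omega) (sph_meet ((hfc' y).mp h2).1 ((hbc y).mp h1).1)))]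
        have hbc' := step_frontier (mem_pyGetNextSteps bc bv) hbc hbv
        have hbv' := step_visited hbc' hbv
        obtain ⟨z, hz⟩ := rsph_nonempty hd hmin (k + 1) (by omega)
        have hzfc' : z ∈ pyGetNextSteps fc fv := (hfc' z).mpr hz
        have hznfv : z ∉ fv := fun hv => hz.2 k (by omega) ((hfv z).mp hv)
        have hgrow := length_lt_update fv (pyGetNextSteps fc fv) z hzfc' hznfv
        have := ih (k + 1) _ _ _ _ hfc' hfv' hbc' hbv'
          (PySem.Set.nodup_update fv _ hnd) (by omega) (by omega)
        have hcast : ((2 * k : Nat) : Int) + 2 = ((2 * (k + 1) : Nat) : Int) := by push_cast; ring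
        rw [hcast]
        exact this

lemma revLoopA_unreach (s1 s2 : List Int) (h : ∀ j, ¬ RBall s1 j s2) :
    ∀ fuel k (fc fv bc bv : PySem.Set (List Int)) (dist : Int),
      (∀ y, y ∈ fc ↔ RSph s1 k y) → (∀ y, y ∈ fv ↔ RBall s1 k y) →
      (∀ y, y ∈ bc ↔ RSph s2 k y) → (∀ y, y ∈ bv ↔ RBall s2 k y) →
      fv.Nodup → Nat.factorial s1.length + 2 ≤ fuel + fv.length →
      revLoopA fuel fc fv bc bv dist = -1 := by
  intro fuel
  induction fuel with
  | zero =>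
    intro k fc fv bc bv dist hfc hfv hbc hbv hnd hfuel
    exfalso
    have := visited_le_factorial s1 fv hnd (fun y hy => rball_perm ((hfv y).mp hy))
    omega
  | succ fuel ih =>
    intro k fc fv bc bv dist hfc hfv hbc hbv hnd hfuel
    simp only [revLoopA]
    by_cases hguard : fc ≠ [] ∧ bc ≠ []
    · rw [if_pos hguard]
      rw [if_neg (inter_eq_nil_intro (fun y ⟨h1, h2⟩ =>
        h (k + k) (sph_meet ((hfc y).mp h1).1 ((hbc y).mp h2).1)))]
      have hfc' := step_frontier (mem_pyGetNextSteps fc fv) hfc hfv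
      have hfv' := step_visited hfc' hfv
      rw [if_neg (inter_eq_nil_intro (fun y ⟨h1, h2⟩ =>
        h ((k + 1) + k) (sph_meet ((hfc' y).mp h2).1 ((hbc y).mp h1).1)))]
      have hbc' := step_frontier (mem_pyGetNextSteps bc bv) hbc hbv
      have hbv' := step_visited hbc' hbv
      have hcap := visited_le_factorial s1 fv hnd (fun y hy => rball_perm ((hfv y).mp hy))
      by_cases hfce : pyGetNextSteps fc fv = []
      · have hfpos : 1 ≤ fuel := by omega
        obtain ⟨fuel', rfl⟩ : ∃ f', fuel = f' + 1 := ⟨fuel - 1, by omega⟩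
        simp only [revLoopA]
        rw [if_neg (by simp [hfce])]
      · obtain ⟨z, hz⟩ := List.exists_mem_of_ne_nil _ hfce
        have hznfv : z ∉ fv := fun hv => (((hfc' z).mp hz).2) k (by omega) ((hfv z).mp hv)
        have hgrow := length_lt_update fv (pyGetNextSteps fc fv) z hz hznfv
        exact ih (k + 1) _ _ _ _ _ hfc' hfv' hbc' hbv'
          (PySem.Set.nodup_update fv _ hnd) (by omega)
    · rw [if_neg hguard]

lemma revLoopB_reach (s1 s2 : List Int) (d : Nat)
    (hd : RBall s1 d s2) (hmin : ∀ j < d, ¬ RBall s1 j s2) :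
    ∀ fuel k (frontier visited : PySem.Set (List Int)),
      (∀ y, y ∈ frontier ↔ RSph s1 k y) → (∀ y, y ∈ visited ↔ RBall s1 k y) →
      visited.Nodup → k ≤ d → Nat.factorial s1.length + 2 ≤ fuel + visited.length →
      revLoopB s2 fuel frontier visited ((k : Nat) : Int) = (d : Int) := by
  intro fuel
  induction fuel with
  | zero =>
    intro k fc fv hfc hfv hnd hk hfuel
    exfalso
    have := visited_le_factorial s1 fv hnd (fun y hy => rball_perm ((hfv y).mp hy))
    omega
  | succ fuel ih =>
    intro k fc fv hfc hfv hnd hk hfuel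
    obtain ⟨yf, hyf⟩ := rsph_nonempty hd hmin k hk
    simp only [revLoopB]
    rw [if_pos (ne_nil_of_exists ⟨yf, (hfc yf).mpr hyf⟩)]
    by_cases hdk : k = d
    · subst hdk
      rw [if_pos ((hfc s2).mpr ⟨hd, hmin⟩)]
    · have hklt : k < d := by omega
      rw [if_neg (fun hs2 => hmin k hklt ((hfc s2).mp hs2).1)]
      have hfc' := step_frontier (mem_altStep fc fv) hfc hfv
      have hfv' := step_visited hfc' hfv
      obtain ⟨z, hz⟩ := rsph_nonempty hd hmin (k + 1) (by omega)
      have hzfc' : z ∈ altStep fc fv := (hfc' z).mpr hz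
      have hznfv : z ∉ fv := fun hv => hz.2 k (by omega) ((hfv z).mp hv)
      have hgrow := length_lt_update fv (altStep fc fv) z hzfc' hznfv
      have := ih (k + 1) _ _ hfc' hfv' (PySem.Set.nodup_update fv _ hnd) (by omega) (by omega)
      have hcast : ((k : Nat) : Int) + 1 = ((k + 1 : Nat) : Int) := by push_cast; ring
      rw [hcast]
      exact this

lemma revLoopB_unreach (s1 s2 : List Int) (h : ∀ j, ¬ RBall s1 j s2) :
    ∀ fuel k (frontier visited : PySem.Set (List Int)) (dist : Int),
      (∀ y, y ∈ frontier ↔ RSph s1 k y) → (∀ y, y ∈ visited ↔ RBall s1 k y) →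
      visited.Nodup → Nat.factorial s1.length + 2 ≤ fuel + visited.length →
      revLoopB s2 fuel frontier visited dist = -1 := by
  intro fuel
  induction fuel with
  | zero =>
    intro k fc fv dist hfc hfv hnd hfuel
    exfalso
    have := visited_le_factorial s1 fv hnd (fun y hy => rball_perm ((hfv y).mp hy))
    omega
  | succ fuel ih =>
    intro k fc fv dist hfc hfv hnd hfuel
    simp only [revLoopB]
    by_cases hguard : fc ≠ []
    · rw [if_pos hguard]
      rw [if_neg (fun hs2 => h k (((hfc s2).mp hs2).1))]
      have hfc' := step_frontier (mem_altStep fc fv) hfc hfv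
      have hfv' := step_visited hfc' hfv
      have hcap := visited_le_factorial s1 fv hnd (fun y hy => rball_perm ((hfv y).mp hy))
      by_cases hfce : altStep fc fv = []
      · have hfpos : 1 ≤ fuel := by omega
        obtain ⟨fuel', rfl⟩ : ∃ f', fuel = f' + 1 := ⟨fuel - 1, by omega⟩
        simp only [revLoopB]
        rw [if_neg (by simp [hfce])]
      · obtain ⟨z, hz⟩ := List.exists_mem_of_ne_nil _ hfce
        have hznfv : z ∉ fv := fun hv => (((hfc' z).mp hz).2) k (by omega) ((hfv z).mp hv)
        have hgrow := length_lt_update fv (altStep fc fv) z hz hznfv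
        exact ih (k + 1) _ _ _ hfc' hfv' (PySem.Set.nodup_update fv _ hnd) (by omega)
    · rw [if_neg hguard]

lemma init_frontier (s y : List Int) : y ∈ PySem.Set.ofList [s] ↔ RSph s 0 y := by
  rw [rsph_zero]
  simp [PySem.Set.mem_ofList]

lemma init_visited (s y : List Int) : y ∈ PySem.Set.ofList [s] ↔ RBall s 0 y := by
  simp [PySem.Set.mem_ofList]
  rfl

lemma sorted_eq_of_perm {s1 s2 : List Int} (h : s2.Perm s1) :
    PySem.List.sorted s1 (fun x => x) false = PySem.List.sorted s2 (fun x => x) false :=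
  PySem.List.sorted_id_eq_of_perm_of_pairwise s1 (PySem.List.sorted s2 (fun x => x) false)
    ((PySem.List.sorted_perm s2 _ false).trans h) (PySem.List.sorted_pairwise s2 _)

-- ===== VERDICT (by name: the statement is the Claim_ definition above) =====
theorem rev_dist_spec : Claim_equal_rev_dist := by
  unfold Claim_equal_rev_dist Spec_rev_dist
  intro s1 s2 _
  unfold rev_dist rev_dist_alt
  by_cases hsrt : PySem.List.sorted s1 (fun x => x) false = PySem.List.sorted s2 (fun x => x) false
  swap
  · rw [if_pos hsrt]
    exact revLoopA_unreach s1 s2 (fun j hb => hsrt (sorted_eq_of_perm (rball_perm hb)))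
      (Nat.factorial s1.length + 3) 0 _ _ _ _ _
      (init_frontier s1) (init_visited s1) (init_frontier s2) (init_visited s2)
      (by simp [PySem.Set.ofList]) (by simp [PySem.Set.ofList])
  rw [if_neg (not_not_intro hsrt)]
  by_cases h : ∃ j, RBall s1 j s2
  · haveI : DecidablePred fun j => RBall s1 j s2 := fun j => Classical.propDecidable _
    obtain hd := Nat.find_spec h
    have hmin : ∀ j < Nat.find h, ¬ RBall s1 j s2 := fun j hj => Nat.find_min h hj
    have hA := revLoopA_reach s1 s2 (Nat.find h) hd hmin (Nat.factorial s1.length + 3) 0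
      _ _ _ _ (init_frontier s1) (init_visited s1) (init_frontier s2) (init_visited s2)
      (by simp [PySem.Set.ofList]) (by omega) (by simp [PySem.Set.ofList])
    have hB := revLoopB_reach s1 s2 (Nat.find h) hd hmin (Nat.factorial s1.length + 3) 0
      _ _ (init_frontier s1) (init_visited s1)
      (by simp [PySem.Set.ofList]) (by omega) (by simp [PySem.Set.ofList])
    simp only [Nat.mul_zero, Nat.cast_zero] at hA hB
    rw [hA, hB]
  · push_neg at h
    rw [revLoopA_unreach s1 s2 h (Nat.factorial s1.length + 3) 0 _ _ _ _ _
        (init_frontier s1) (init_visited s1) (init_frontier s2) (init_visited s2)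
        (by simp [PySem.Set.ofList]) (by simp [PySem.Set.ofList]),
      revLoopB_unreach s1 s2 h (Nat.factorial s1.length + 3) 0 _ _ _
        (init_frontier s1) (init_visited s1)
        (by simp [PySem.Set.ofList]) (by simp [PySem.Set.ofList])]
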